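-- pv_equiv track=rewrite | github.com/Pulchi/ML_Reentrancy_Detector | webapp/app.py | json_features
-- ===== SOURCE A (Python) =====
-- REENTRANCY_CHECKS = {
--     "reentrancy-eth", "reentrancy-no-eth", "reentrancy-benign",
--     "reentrancy-unlimited-gas", "reentrancy-events",
-- }
--
-- def json_features(json_data):
--     """Extract has_reentrancy_eth and num_reentrancy_detectors from Slither JSON."""
--     has_eth = 0
--     num_det = 0
--     if json_data:
--         for d in json_data.get("results", {}).get("detectors", []):
--             check = d.get("check", "")
--             if check in REENTRANCY_CHECKS:
--                 num_det += 1
--                 if check == "reentrancy-eth":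
--                     has_eth = 1
--     return {"has_reentrancy_eth": has_eth, "num_reentrancy_detectors": num_det}
-- ===== SOURCE B (Python) =====
-- REENTRANCY_CHECKS = {
--     "reentrancy-eth", "reentrancy-no-eth", "reentrancy-benign",
--     "reentrancy-unlimited-gas", "reentrancy-events",
-- }
--
-- def json_features(json_data):
--     """Extract has_reentrancy_eth and num_reentrancy_detectors from Slither JSON."""
--     # Build a frequency table of every detector check string in one pass,
--     # then answer both questions by reading fixed buckets of the table.
--     counts = {}
--     for d in (json_data or {}).get("results", {}).get("detectors", []):
--         c = d.get("check", "")
--         counts[c] = counts.get(c, 0) + 1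
--     return {
--         "has_reentrancy_eth": 1 if counts.get("reentrancy-eth", 0) else 0,
--         "num_reentrancy_detectors": sum(counts.get(c, 0) for c in REENTRANCY_CHECKS),
--     }
-- ===== Notes on version B (the rewrite author's own statement) =====
-- stated objective: alternative
-- what changed: Replaces A's stateful flag/counter loop with a per-element membership test by a single pass that builds a frequency table of all check strings, then derives the eth flag and the detector count by reading the five fixed reentrancy buckets of that table.
import Mathlib
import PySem

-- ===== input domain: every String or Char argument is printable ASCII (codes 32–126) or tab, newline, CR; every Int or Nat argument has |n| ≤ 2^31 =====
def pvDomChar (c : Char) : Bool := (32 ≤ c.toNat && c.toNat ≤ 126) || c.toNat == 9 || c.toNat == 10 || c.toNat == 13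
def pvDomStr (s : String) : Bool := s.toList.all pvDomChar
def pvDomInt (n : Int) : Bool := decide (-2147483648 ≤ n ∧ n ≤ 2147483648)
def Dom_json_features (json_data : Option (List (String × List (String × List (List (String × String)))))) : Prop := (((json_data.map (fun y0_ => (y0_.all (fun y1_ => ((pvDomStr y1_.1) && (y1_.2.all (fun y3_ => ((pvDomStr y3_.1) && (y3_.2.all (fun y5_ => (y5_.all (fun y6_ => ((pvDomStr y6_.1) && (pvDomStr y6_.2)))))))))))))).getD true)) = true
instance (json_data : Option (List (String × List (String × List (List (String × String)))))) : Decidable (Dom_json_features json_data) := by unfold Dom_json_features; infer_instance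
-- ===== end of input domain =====

-- B replaces A's stateful flag/counter loop (per-element membership test) by one pass
-- building a frequency table of check strings, then reading five fixed buckets — objective: alternative.

-- ===== PORT A =====
-- the module-level set REENTRANCY_CHECKS (membership only, so a list of its distinct elements)
def reentrancyChecks : List String :=
  ["reentrancy-eth", "reentrancy-no-eth", "reentrancy-benign",
   "reentrancy-unlimited-gas", "reentrancy-events"]

def json_features (json_data : Option (List (String × List (String × List (List (String × String)))))) : List (String × Int) :=
  let st : Int × Int :=
    match json_data with
    | none => (0, 0)                -- 'if json_data:' false on None
    | some jd =>
      if jd = [] then (0, 0)        -- 'if json_data:' false on {}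
      else
        let detectors :=
          (PySem.Dict.mk ((PySem.Dict.mk jd).getD "results" [])).getD "detectors" []
        detectors.foldl (fun (acc : Int × Int) d =>
          let check := (PySem.Dict.mk d).getD "check" ""
          if check ∈ reentrancyChecks then
            ((if check = "reentrancy-eth" then 1 else acc.1), acc.2 + 1)
          else acc) (0, 0)
  [("has_reentrancy_eth", st.1), ("num_reentrancy_detectors", st.2)]

-- ===== PORT B =====
def json_features_alt (json_data : Option (List (String × List (String × List (List (String × String)))))) : List (String × Int) :=
  -- one pass: histogram of check strings  (counts[c] = counts.get(c,0)+1)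
  let counts : PySem.Dict String Int :=
    ((PySem.Dict.mk ((PySem.Dict.mk (json_data.getD [])).getD "results" [])).getD "detectors" []).foldl
      (fun counts d =>
        let c := (PySem.Dict.mk d).getD "check" ""
        counts.insert c (counts.getD c 0 + 1)) PySem.Dict.empty
  [("has_reentrancy_eth", if counts.getD "reentrancy-eth" 0 ≠ 0 then (1 : Int) else 0),
   ("num_reentrancy_detectors",
      reentrancyChecks.foldl (fun s c => s + counts.getD c 0) 0)]

-- ===== PRECONDITION & SPEC =====
def Spec_json_features (json_data : Option (List (String × List (String × List (List (String × String)))))) (out : List (String × Int)) : Prop := out = json_features_alt json_data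
instance (json_data : Option (List (String × List (String × List (List (String × String)))))) (out : List (String × Int)) : Decidable (Spec_json_features json_data out) := by unfold Spec_json_features; infer_instance

-- ===== CLAIM (what is proved, stated in full; the proofs are below) =====
def Claim_equal_json_features : Prop := ∀ (json_data : Option (List (String × List (String × List (List (String × String)))))), Dom_json_features json_data → Spec_json_features json_data (json_features json_data)

-- ===== LEMMAS AND PROOFS =====

-- A's loop state over the projected check strings
def loopA (l : List String) (acc : Int × Int) : Int × Int :=
  l.foldl (fun acc c =>
    if c ∈ reentrancyChecks then
      ((if c = "reentrancy-eth" then 1 else acc.1), acc.2 + 1)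
    else acc) acc

-- B's bucket sum, phrased over plain counts of the projected list
def sumB (l : List String) : Int :=
  reentrancyChecks.foldl (fun s c => s + (l.count c : Int)) 0

lemma sumB_nil : sumB [] = 0 := by decide

lemma sumB_cons (a : String) (l : List String) :
    sumB (a :: l) = sumB l + (if a ∈ reentrancyChecks then 1 else 0) := by
  simp only [sumB, reentrancyChecks, List.foldl, List.count_cons]
  by_cases h1 : a = "reentrancy-eth" <;>
  by_cases h2 : a = "reentrancy-no-eth" <;>
  by_cases h3 : a = "reentrancy-benign" <;>
  by_cases h4 : a = "reentrancy-unlimited-gas" <;>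
  by_cases h5 : a = "reentrancy-events" <;>
  simp_all [List.mem_cons, beq_iff_eq] <;> ring

lemma loopA_eq (l : List String) (h n : Int) :
    loopA l (h, n) =
      ((if "reentrancy-eth" ∈ l then 1 else h), n + sumB l) := by
  induction l generalizing h n with
  | nil => simp [loopA, sumB_nil]
  | cons a l ih =>
    simp only [loopA, List.foldl] at ih ⊢
    rw [sumB_cons]
    have hna : ("reentrancy-eth" ∈ a :: l) ↔ (a = "reentrancy-eth" ∨ "reentrancy-eth" ∈ l) := by
      simp [List.mem_cons, eq_comm]
    by_cases hmem : a ∈ reentrancyChecks <;> by_cases heth : a = "reentrancy-eth"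
    · subst heth
      simp only [if_pos hmem, ih, Prod.ext_iff]
      refine ⟨by simp [hna], by omega⟩
    · simp only [if_pos hmem, if_neg heth, ih, Prod.ext_iff]
      refine ⟨by simp [hna, heth], by omega⟩
    · subst heth; exact absurd (by decide) hmem
    · simp only [if_neg hmem, ih, Prod.ext_iff]
      refine ⟨by simp [hna, heth], by simp⟩

-- B's histogram read back as plain counts of the projected list
lemma counts_getD (l : List (List (String × String))) (c : String) :
    (List.foldl (fun (counts : PySem.Dict String Int) d =>
        counts.insert ((PySem.Dict.mk d).getD "check" "")
          (counts.getD ((PySem.Dict.mk d).getD "check" "") 0 + 1)) PySem.Dict.empty l).getD c 0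
      = ((l.map (fun d => (PySem.Dict.mk d).getD "check" "")).count c : Int) := by
  rw [show (List.foldl (fun (counts : PySem.Dict String Int) d =>
        counts.insert ((PySem.Dict.mk d).getD "check" "")
          (counts.getD ((PySem.Dict.mk d).getD "check" "") 0 + 1)) PySem.Dict.empty l)
      = List.foldl (fun (counts : PySem.Dict String Int) x => counts.insert x (counts.getD x 0 + 1))
          PySem.Dict.empty (l.map (fun d => (PySem.Dict.mk d).getD "check" ""))
      by rw [List.foldl_map]]
  rw [PySem.Dict.getD_foldl_insert_add_one]
  simp [PySem.Dict.getD, PySem.Dict.get?, PySem.Dict.empty]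

-- both result lists agree for ANY detector list
lemma core_eq (dets : List (List (String × String))) :
    (let st : Int × Int := dets.foldl (fun (acc : Int × Int) d =>
        let check := (PySem.Dict.mk d).getD "check" ""
        if check ∈ reentrancyChecks then
          ((if check = "reentrancy-eth" then 1 else acc.1), acc.2 + 1)
        else acc) (0, 0)
     [("has_reentrancy_eth", st.1), ("num_reentrancy_detectors", st.2)])
  = (let counts : PySem.Dict String Int := dets.foldl (fun counts d =>
        let c := (PySem.Dict.mk d).getD "check" ""
        counts.insert c (counts.getD c 0 + 1)) PySem.Dict.empty
     [("has_reentrancy_eth", if counts.getD "reentrancy-eth" 0 ≠ 0 then (1 : Int) else 0),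
      ("num_reentrancy_detectors",
        reentrancyChecks.foldl (fun s c => s + counts.getD c 0) 0)]) := by
  simp only []
  have hA : dets.foldl (fun (acc : Int × Int) d =>
      let check := (PySem.Dict.mk d).getD "check" ""
      if check ∈ reentrancyChecks then
        ((if check = "reentrancy-eth" then 1 else acc.1), acc.2 + 1)
      else acc) (0, 0)
    = loopA (dets.map (fun d => (PySem.Dict.mk d).getD "check" "")) (0, 0) := by
    rw [loopA, List.foldl_map]
  rw [hA, loopA_eq]
  set proj := dets.map (fun d => (PySem.Dict.mk d).getD "check" "") with hp
  simp only [counts_getD, ← hp, sumB, zero_add]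
  by_cases hm : "reentrancy-eth" ∈ proj
  · have h0 := List.count_pos_iff.mpr hm
    have h2 : ¬ (proj.count "reentrancy-eth" = 0) := by omega
    simp [hm, h2]
  · have h0 := List.count_eq_zero_of_not_mem hm
    simp [hm, h0]

-- ===== VERDICT (by name: the statement is the Claim_ definition above) =====
theorem json_features_spec : Claim_equal_json_features := by
  intro json_data _
  unfold Spec_json_features json_features json_features_alt
  match json_data with
  | none => decide
  | some jd =>
    by_cases hjd : jd = []
    · subst hjd; decide
    · simp only [Option.getD, if_neg hjd]
      exact core_eq _
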